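-- pv_equiv track=rewrite | github.com/Alexander-Berg/2022-tests-examples-2 | Taxi/tests_discounts/test_admin/admin_test_utils.py | patch_db_state
-- ===== SOURCE A (Python) =====
-- import copy
--
-- def patch_db_state(state, append_patch=None, update_patch=None):
--     new_state = copy.deepcopy(state)
--     if update_patch:
--         for item in update_patch:
--             if item in state:
--                 new_state[item] = update_patch[item]
--     if append_patch:
--         for item in append_patch:
--             if item in state:
--                 new_state[item] += append_patch[item]
--     return new_state
-- ===== SOURCE B (Python) =====
-- import copy
--
-- def patch_db_state(state, append_patch=None, update_patch=None):
--     up = update_patch or {}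
--     ap = append_patch or {}
--     new_state = {}
--     for key, value in state.items():
--         v = up[key] if key in up else copy.deepcopy(value)
--         if key in ap:
--             v = v + ap[key]
--         new_state[key] = v
--     return new_state
-- ===== Notes on version B (the rewrite author's own statement) =====
-- stated objective: simpler
-- what changed: Instead of two passes over the patch dicts with an 'in state' membership test each, B builds the result in one pass over state's own items, consulting each patch once per key; the 'if item in state' guards disappear because every visited key is a state key.
import Mathlib
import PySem

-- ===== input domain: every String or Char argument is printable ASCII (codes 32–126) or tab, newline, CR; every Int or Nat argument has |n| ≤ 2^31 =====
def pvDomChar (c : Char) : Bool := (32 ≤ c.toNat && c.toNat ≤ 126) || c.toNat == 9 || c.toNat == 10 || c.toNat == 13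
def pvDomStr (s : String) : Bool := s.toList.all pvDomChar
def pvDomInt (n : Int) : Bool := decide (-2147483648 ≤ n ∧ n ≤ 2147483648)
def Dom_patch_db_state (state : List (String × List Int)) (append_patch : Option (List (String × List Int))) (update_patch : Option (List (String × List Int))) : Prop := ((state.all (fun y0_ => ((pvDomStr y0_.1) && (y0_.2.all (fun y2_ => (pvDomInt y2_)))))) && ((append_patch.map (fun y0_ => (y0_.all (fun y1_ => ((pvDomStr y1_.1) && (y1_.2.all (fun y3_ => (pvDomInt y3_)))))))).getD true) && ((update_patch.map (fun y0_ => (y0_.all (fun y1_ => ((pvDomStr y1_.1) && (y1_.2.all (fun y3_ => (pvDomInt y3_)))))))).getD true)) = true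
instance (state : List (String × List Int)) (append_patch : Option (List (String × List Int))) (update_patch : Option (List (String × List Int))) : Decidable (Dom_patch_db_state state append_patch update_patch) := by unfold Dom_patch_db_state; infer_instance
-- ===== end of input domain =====

-- B builds the result in one pass over state's items (consulting the patches per key) instead of
-- A's two passes over the patch dicts; return-value equivalence only — Python A additionally
-- aliases patch value lists into its result and may mutate update_patch's lists in place, B does not.

-- ===== PORT A =====
-- A: deep-copy state; for each update key, if it is a state key, overwrite; then for each append
-- key, if it is a state key, extend the entry in place.
def patch_db_state (state : List (String × List Int)) (append_patch : Option (List (String × List Int))) (update_patch : Option (List (String × List Int))) : List (String × List Int) :=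
  let new_state := PySem.Dict.mk state
  let new_state :=
    match update_patch with
    | none => new_state
    | some u =>
      if u.isEmpty then new_state
      else (PySem.Dict.mk u).keys.foldl
        (fun ns item =>
          if (PySem.Dict.mk state).contains item then
            ns.insert item ((PySem.Dict.mk u).getD item [])
          else ns) new_state
  let new_state :=
    match append_patch with
    | none => new_state
    | some a =>
      if a.isEmpty then new_state
      else (PySem.Dict.mk a).keys.foldl
        (fun ns item =>
          if (PySem.Dict.mk state).contains item then
            ns.insert item (ns.getD item [] ++ (PySem.Dict.mk a).getD item [])
          else ns) new_state
  new_state.items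

-- ===== PORT B =====
-- value after the update step: up[key] if key in up else value
def pvUpd (u : PySem.Dict String (List Int)) (kv : String × List Int) : List Int :=
  match u.get? kv.1 with
  | some w => w
  | none => kv.2

-- value after the append step: v + ap[key] if key in ap else v
def pvApp (a : PySem.Dict String (List Int)) (kv : String × List Int) (v : List Int) : List Int :=
  match a.get? kv.1 with
  | some w => v ++ w
  | none => v

def patch_db_state_alt (state : List (String × List Int)) (append_patch : Option (List (String × List Int))) (update_patch : Option (List (String × List Int))) : List (String × List Int) :=
  let u := PySem.Dict.mk (update_patch.getD [])
  let a := PySem.Dict.mk (append_patch.getD [])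
  state.map (fun kv => (kv.1, pvApp a kv (pvUpd u kv)))

-- ===== PRECONDITION & SPEC =====
-- Pre_ excludes association lists with duplicate keys: they are an ambiguous representation of a
-- Python dict (duplicates collapse to the last value), so neither program's behaviour on them is
-- specified by A.
def Pre_patch_db_state (state : List (String × List Int)) (append_patch : Option (List (String × List Int))) (update_patch : Option (List (String × List Int))) : Prop :=
  (state.map Prod.fst).Nodup ∧ ((append_patch.getD []).map Prod.fst).Nodup ∧ ((update_patch.getD []).map Prod.fst).Nodup
instance (state : List (String × List Int)) (append_patch : Option (List (String × List Int))) (update_patch : Option (List (String × List Int))) : Decidable (Pre_patch_db_state state append_patch update_patch) := by unfold Pre_patch_db_state; infer_instance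

def pvWitness_patch_db_state : (List (String × List Int)) × (Option (List (String × List Int))) × (Option (List (String × List Int))) :=
  ([("a", [1]), ("b", [2])], some [("b", [4]), ("c", [9])], some [("a", [3])])

def Spec_patch_db_state (state : List (String × List Int)) (append_patch : Option (List (String × List Int))) (update_patch : Option (List (String × List Int))) (out : List (String × List Int)) : Prop := out = patch_db_state_alt state append_patch update_patch
instance (state : List (String × List Int)) (append_patch : Option (List (String × List Int))) (update_patch : Option (List (String × List Int))) (out : List (String × List Int)) : Decidable (Spec_patch_db_state state append_patch update_patch out) := by unfold Spec_patch_db_state; infer_instance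

-- ===== CLAIM (what is proved, stated in full; the proofs are below) =====
def Claim_equal_patch_db_state : Prop := ∀ (state : List (String × List Int)) (append_patch : Option (List (String × List Int))) (update_patch : Option (List (String × List Int))), Dom_patch_db_state state append_patch update_patch → Pre_patch_db_state state append_patch update_patch → Spec_patch_db_state state append_patch update_patch (patch_db_state state append_patch update_patch)

-- ===== LEMMAS AND PROOFS =====

-- inserting at a key present in a mapped-over-state dict rewrites just that entry's value
theorem pv_insert_mapped (state : List (String × List Int)) (k : String) (w : List Int)
    (f : String × List Int → List Int) (hk : k ∈ state.map Prod.fst) :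
    (PySem.Dict.mk (state.map (fun kv => (kv.1, f kv)))).insert k w
      = PySem.Dict.mk (state.map (fun kv => (kv.1, if kv.1 = k then w else f kv))) := by
  apply PySem.Dict.ext
  have hc : (PySem.Dict.mk (state.map (fun kv => (kv.1, f kv)))).contains k = true := by
    rw [PySem.Dict.contains_iff_mem_keys, PySem.Dict.keys_mk]
    simpa using hk
  rw [PySem.Dict.items_insert_of_contains _ _ hc]
  show (state.map (fun kv => (kv.1, f kv))).map _ = _
  rw [List.map_map]
  apply List.map_congr_left
  intro kv _
  by_cases h : kv.1 = k <;> simp [Function.comp, h]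

-- the update loop over arbitrary keys ks rewrites exactly the state entries whose key is in ks
theorem pv_fold_update (ks : List String) : ∀ (state : List (String × List Int))
    (U : String → List Int) (f : String × List Int → List Int),
    ks.foldl
      (fun ns item => if (PySem.Dict.mk state).contains item then ns.insert item (U item) else ns)
      (PySem.Dict.mk (state.map (fun kv => (kv.1, f kv))))
    = PySem.Dict.mk (state.map (fun kv => (kv.1, if kv.1 ∈ ks then U kv.1 else f kv))) := by
  induction ks with
  | nil => intro state U f; simp
  | cons k ks ih =>
    intro state U f
    rw [List.foldl_cons]
    by_cases hc : (PySem.Dict.mk state).contains k = true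
    · have hk : k ∈ state.map Prod.fst := by
        have := (PySem.Dict.contains_iff_mem_keys (PySem.Dict.mk state) k).mp hc
        rwa [PySem.Dict.keys_mk] at this
      rw [if_pos hc, pv_insert_mapped state k (U k) f hk, ih]
      congr 1
      apply List.map_congr_left
      intro kv _
      by_cases h1 : kv.1 ∈ ks <;> by_cases h2 : kv.1 = k <;>
        simp [List.mem_cons, h1, h2]
    · have hk : k ∉ state.map Prod.fst := by
        intro hmem
        exact hc ((PySem.Dict.contains_iff_mem_keys (PySem.Dict.mk state) k).mpr
          (by rwa [PySem.Dict.keys_mk]))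
      rw [if_neg hc, ih]
      congr 1
      apply List.map_congr_left
      intro kv hkv
      have hne : kv.1 ≠ k := fun h => hk (h ▸ List.mem_map_of_mem hkv)
      simp [List.mem_cons, hne]

-- the append loop over distinct keys ks extends exactly the state entries whose key is in ks
theorem pv_fold_append (ks : List String) : ∀ (state : List (String × List Int))
    (A : String → List Int) (f : String × List Int → List Int),
    (state.map Prod.fst).Nodup → ks.Nodup →
    ks.foldl
      (fun ns item => if (PySem.Dict.mk state).contains item then
          ns.insert item (ns.getD item [] ++ A item) else ns)
      (PySem.Dict.mk (state.map (fun kv => (kv.1, f kv))))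
    = PySem.Dict.mk (state.map (fun kv => (kv.1, if kv.1 ∈ ks then f kv ++ A kv.1 else f kv))) := by
  induction ks with
  | nil => intro state A f _ _; simp
  | cons k ks ih =>
    intro state A f hs hnd
    rw [List.foldl_cons]
    have hnd' : ks.Nodup := (List.nodup_cons.mp hnd).2
    have hknotin : k ∉ ks := (List.nodup_cons.mp hnd).1
    by_cases hc : (PySem.Dict.mk state).contains k = true
    · have hk : k ∈ state.map Prod.fst := by
        have := (PySem.Dict.contains_iff_mem_keys (PySem.Dict.mk state) k).mp hc
        rwa [PySem.Dict.keys_mk] at this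
      rw [if_pos hc,
        pv_insert_mapped state k ((PySem.Dict.mk (state.map (fun kv => (kv.1, f kv)))).getD k [] ++ A k) f hk,
        ih state A _ hs hnd']
      congr 1
      apply List.map_congr_left
      intro kv hkv
      by_cases h2 : kv.1 = k
      · have hgd : (PySem.Dict.mk (state.map (fun kv => (kv.1, f kv)))).getD k [] = f kv := by
          apply PySem.Dict.getD_of_mem_items
          · exact h2 ▸ List.mem_map_of_mem hkv (f := fun kv => (kv.1, f kv))
          · rw [PySem.Dict.keys_mk, List.map_map]
            simpa [Function.comp] using hs
        simp [List.mem_cons, h2, hgd, hknotin]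
      · by_cases h1 : kv.1 ∈ ks <;> simp [List.mem_cons, h1, h2]
    · have hk : k ∉ state.map Prod.fst := by
        intro hmem
        exact hc ((PySem.Dict.contains_iff_mem_keys (PySem.Dict.mk state) k).mpr
          (by rwa [PySem.Dict.keys_mk]))
      rw [if_neg hc, ih state A f hs hnd']
      congr 1
      apply List.map_congr_left
      intro kv hkv
      have hne : kv.1 ≠ k := fun h => hk (h ▸ List.mem_map_of_mem hkv)
      simp [List.mem_cons, hne]

-- membership-test form of B's lookup, update shape
theorem pv_upd_eq (u : List (String × List Int)) (kv : String × List Int) :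
    (if kv.1 ∈ u.map Prod.fst then (PySem.Dict.mk u).getD kv.1 [] else kv.2)
      = pvUpd (PySem.Dict.mk u) kv := by
  unfold pvUpd
  cases h : (PySem.Dict.mk u).get? kv.1 with
  | none =>
    have : kv.1 ∉ u.map Prod.fst := by
      have := (PySem.Dict.get?_eq_none_iff_not_mem_keys (PySem.Dict.mk u) kv.1).mp h
      rwa [PySem.Dict.keys_mk] at this
    simp [this]
  | some w =>
    have hmem : kv.1 ∈ u.map Prod.fst := by
      by_contra hn
      have hnone := (PySem.Dict.get?_eq_none_iff_not_mem_keys (PySem.Dict.mk u) kv.1).mpr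
        (by rwa [PySem.Dict.keys_mk])
      rw [h] at hnone
      simp at hnone
    simp [hmem, PySem.Dict.getD_eq_get?_getD, h]

-- membership-test form of B's lookup, append shape
theorem pv_app_eq (a : List (String × List Int)) (kv : String × List Int) (v : List Int) :
    (if kv.1 ∈ a.map Prod.fst then v ++ (PySem.Dict.mk a).getD kv.1 [] else v)
      = pvApp (PySem.Dict.mk a) kv v := by
  unfold pvApp
  cases h : (PySem.Dict.mk a).get? kv.1 with
  | none =>
    have : kv.1 ∉ a.map Prod.fst := by
      have := (PySem.Dict.get?_eq_none_iff_not_mem_keys (PySem.Dict.mk a) kv.1).mp h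
      rwa [PySem.Dict.keys_mk] at this
    simp [this]
  | some w =>
    have hmem : kv.1 ∈ a.map Prod.fst := by
      by_contra hn
      have hnone := (PySem.Dict.get?_eq_none_iff_not_mem_keys (PySem.Dict.mk a) kv.1).mpr
        (by rwa [PySem.Dict.keys_mk])
      rw [h] at hnone
      simp at hnone
    simp [hmem, PySem.Dict.getD_eq_get?_getD, h]

-- the update stage of A, for every update dict u (including [])
theorem pv_stage_update (state u : List (String × List Int)) :
    (PySem.Dict.mk u).keys.foldl
      (fun ns item => if (PySem.Dict.mk state).contains item then
          ns.insert item ((PySem.Dict.mk u).getD item []) else ns)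
      (PySem.Dict.mk state)
    = PySem.Dict.mk (state.map (fun kv => (kv.1, pvUpd (PySem.Dict.mk u) kv))) := by
  have h0 : PySem.Dict.mk state
      = PySem.Dict.mk (state.map (fun kv => (kv.1, Prod.snd kv))) := by simp
  have h1 := congrArg
    (fun d => (PySem.Dict.mk u).keys.foldl
      (fun ns item => if (PySem.Dict.mk state).contains item then
          ns.insert item ((PySem.Dict.mk u).getD item []) else ns) d) h0
  have h1' : (PySem.Dict.mk u).keys.foldl
      (fun ns item => if (PySem.Dict.mk state).contains item = true then
          ns.insert item ((PySem.Dict.mk u).getD item []) else ns)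
      (PySem.Dict.mk state)
    = (PySem.Dict.mk u).keys.foldl
      (fun ns item => if (PySem.Dict.mk state).contains item = true then
          ns.insert item ((PySem.Dict.mk u).getD item []) else ns)
      (PySem.Dict.mk (state.map (fun kv => (kv.1, Prod.snd kv)))) := h1
  rw [h1', PySem.Dict.keys_mk,
    pv_fold_update (u.map (fun x => x.1)) state (fun k => (PySem.Dict.mk u).getD k []) Prod.snd]
  congr 1
  apply List.map_congr_left
  intro kv _
  exact congrArg (Prod.mk kv.1) (pv_upd_eq u kv)

-- the append stage of A, on a state whose values have already been rewritten by f
theorem pv_stage_append (state a : List (String × List Int)) (f : String × List Int → List Int)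
    (hs : (state.map Prod.fst).Nodup) (ha : (a.map Prod.fst).Nodup) :
    (PySem.Dict.mk a).keys.foldl
      (fun ns item => if (PySem.Dict.mk state).contains item then
          ns.insert item (ns.getD item [] ++ (PySem.Dict.mk a).getD item []) else ns)
      (PySem.Dict.mk (state.map (fun kv => (kv.1, f kv))))
    = PySem.Dict.mk (state.map (fun kv => (kv.1, pvApp (PySem.Dict.mk a) kv (f kv)))) := by
  rw [PySem.Dict.keys_mk,
    pv_fold_append (a.map (fun x => x.1)) state (fun k => (PySem.Dict.mk a).getD k []) f hs
      (by simpa using ha)]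
  congr 1
  apply List.map_congr_left
  intro kv _
  exact congrArg (Prod.mk kv.1) (pv_app_eq a kv (f kv))

-- both stages composed: A's whole computation in B's one-pass form
theorem pv_core (state u a : List (String × List Int)) (hs : (state.map Prod.fst).Nodup)
    (ha : (a.map Prod.fst).Nodup) :
    ((PySem.Dict.mk a).keys.foldl
        (fun ns item => if (PySem.Dict.mk state).contains item then
            ns.insert item (ns.getD item [] ++ (PySem.Dict.mk a).getD item []) else ns)
        ((PySem.Dict.mk u).keys.foldl
          (fun ns item => if (PySem.Dict.mk state).contains item then
              ns.insert item ((PySem.Dict.mk u).getD item []) else ns)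
          (PySem.Dict.mk state))).items
      = state.map (fun kv => (kv.1, pvApp (PySem.Dict.mk a) kv (pvUpd (PySem.Dict.mk u) kv))) := by
  rw [pv_stage_update state u, pv_stage_append state a _ hs ha]

-- ===== VERDICT (by name: the statement is the Claim_ definition above) =====
theorem patch_db_state_spec : Claim_equal_patch_db_state := by
  intro state append_patch update_patch _ hpre
  obtain ⟨hs, hap, hup⟩ := hpre
  cases update_patch with
  | none =>
    cases append_patch with
    | none => exact pv_core state [] [] hs (by simp)
    | some a =>
      cases a with
      | nil => exact pv_core state [] [] hs (by simp)
      | cons p rest => exact pv_core state [] (p :: rest) hs hap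
  | some u =>
    cases u with
    | nil =>
      cases append_patch with
      | none => exact pv_core state [] [] hs (by simp)
      | some a =>
        cases a with
        | nil => exact pv_core state [] [] hs (by simp)
        | cons p rest => exact pv_core state [] (p :: rest) hs hap
    | cons q urest =>
      cases append_patch with
      | none => exact pv_core state (q :: urest) [] hs (by simp)
      | some a =>
        cases a with
        | nil => exact pv_core state (q :: urest) [] hs (by simp)
        | cons p rest => exact pv_core state (q :: urest) (p :: rest) hs hap
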